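-- pv_equiv track=rewrite | github.com/ivannp/redeal | tests/test_dds.py | compare_dictionaries
-- ===== SOURCE A (Python) =====
-- def compare_dictionaries(d1, d2):
--     d1_keys = set(d1.keys())
--     d2_keys = set(d2.keys())
--     intersect_keys = d1_keys.intersection(d2_keys)
--     if len(d1_keys) != len(intersect_keys):
--         return False
--     for key in intersect_keys:
--         if d1[key] != d2[key]:
--             return False
--     return True
-- ===== SOURCE B (Python) =====
-- def compare_dictionaries(d1, d2):
--     xs = sorted(d1.items(), key=lambda kv: kv[0])
--     ys = sorted(d2.items(), key=lambda kv: kv[0])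
--     i = j = 0
--     while i < len(xs):
--         if j == len(ys) or xs[i][0] < ys[j][0]:
--             return False
--         if ys[j][0] < xs[i][0]:
--             j += 1
--         elif xs[i][1] != ys[j][1]:
--             return False
--         else:
--             i += 1
--             j += 1
--     return True
-- ===== Notes on version B (the rewrite author's own statement) =====
-- stated objective: alternative
-- what changed: Replaces A's key-set/intersection construction plus per-key hash lookups with a sort-then-merge: both item lists are sorted by key and a single two-pointer scan checks that every key of d1 is matched in d2 with an equal value.
import Mathlib
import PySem

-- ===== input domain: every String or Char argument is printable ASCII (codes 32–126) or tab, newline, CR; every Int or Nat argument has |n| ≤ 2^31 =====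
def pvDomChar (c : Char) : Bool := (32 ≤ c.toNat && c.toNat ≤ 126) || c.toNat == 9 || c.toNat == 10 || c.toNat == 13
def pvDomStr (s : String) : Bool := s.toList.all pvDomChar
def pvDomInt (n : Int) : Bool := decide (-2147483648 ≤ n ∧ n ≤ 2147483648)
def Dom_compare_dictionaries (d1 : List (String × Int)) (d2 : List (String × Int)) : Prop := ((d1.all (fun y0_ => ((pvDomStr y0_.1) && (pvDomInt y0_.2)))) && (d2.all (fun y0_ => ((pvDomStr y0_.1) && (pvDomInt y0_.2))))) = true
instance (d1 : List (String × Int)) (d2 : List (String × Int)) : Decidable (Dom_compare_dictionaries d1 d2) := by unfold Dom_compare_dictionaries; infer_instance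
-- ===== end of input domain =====

-- B replaces A's key-set/intersection construction and hash lookups with a different
-- algorithm: sort both item lists by key and run one two-pointer merge scan (alternative).

-- ===== PORT A =====
-- the 'for key in intersect_keys: if d1[key] != d2[key]: return False' loop of A
def pvLoopA (D1 D2 : PySem.Dict String Int) : List String → Bool
  | [] => true
  | k :: ks => if D1.get? k ≠ D2.get? k then false else pvLoopA D1 D2 ks

def compare_dictionaries (d1 : List (String × Int)) (d2 : List (String × Int)) : Bool :=
  let D1 := PySem.Dict.ofList d1
  let D2 := PySem.Dict.ofList d2
  let d1_keys : PySem.Set String := PySem.Set.ofList D1.keys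
  let d2_keys : PySem.Set String := PySem.Set.ofList D2.keys
  let intersect_keys : PySem.Set String := PySem.Set.inter d1_keys d2_keys
  if PySem.Set.len d1_keys ≠ PySem.Set.len intersect_keys then false
  else pvLoopA D1 D2 intersect_keys

-- ===== PORT B =====
-- the 'while i < len(xs): …' two-pointer scan of B: advancing i / j is taking the tail
def pvMerge : List (String × Int) → List (String × Int) → Bool
  | [], _ => true
  | _ :: _, [] => false
  | (k, v) :: xs, (k2, v2) :: ys =>
      if k < k2 then false
      else if k2 < k then pvMerge ((k, v) :: xs) ys
      else if v ≠ v2 then false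
      else pvMerge xs ys
termination_by xs ys => xs.length + ys.length

def compare_dictionaries_alt (d1 : List (String × Int)) (d2 : List (String × Int)) : Bool :=
  let xs := PySem.List.sorted (PySem.Dict.ofList d1).items (fun kv => kv.1) false
  let ys := PySem.List.sorted (PySem.Dict.ofList d2).items (fun kv => kv.1) false
  pvMerge xs ys

-- ===== PRECONDITION & SPEC =====
def Spec_compare_dictionaries (d1 : List (String × Int)) (d2 : List (String × Int)) (out : Bool) : Prop := out = compare_dictionaries_alt d1 d2
instance (d1 : List (String × Int)) (d2 : List (String × Int)) (out : Bool) : Decidable (Spec_compare_dictionaries d1 d2 out) := by unfold Spec_compare_dictionaries; infer_instance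

-- ===== CLAIM (what is proved, stated in full; the proofs are below) =====
def Claim_equal_compare_dictionaries : Prop := ∀ (d1 : List (String × Int)) (d2 : List (String × Int)), Dom_compare_dictionaries d1 d2 → Spec_compare_dictionaries d1 d2 (compare_dictionaries d1 d2)

-- ===== LEMMAS AND PROOFS =====

-- first-match association lookup, the abstract meaning of both sides' value checks
def pvLk : List (String × Int) → String → Option Int
  | [], _ => none
  | (a, b) :: t, k => if a = k then some b else pvLk t k

theorem pvLk_eq_get? (l : List (String × Int)) (k : String) :
    pvLk l k = (PySem.Dict.mk l).get? k := by
  induction l with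
  | nil => rfl
  | cons p t ih =>
    obtain ⟨a, b⟩ := p
    rw [PySem.Dict.get?_mk_cons]
    simp only [pvLk, beq_iff_eq, ih]

theorem pvLk_eq_none_of_forall_lt (ys : List (String × Int)) (k : String)
    (h : ∀ p ∈ ys, k < p.1) : pvLk ys k = none := by
  induction ys with
  | nil => rfl
  | cons p t ih =>
    obtain ⟨a, b⟩ := p
    have hka : k < a := h (a, b) (by simp)
    rw [pvLk, if_neg (ne_of_gt hka)]
    exact ih (fun q hq => h q (List.mem_cons_of_mem _ hq))

theorem pvAll_congr {α : Type} (l : List α) (f g : α → Bool)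
    (h : ∀ x ∈ l, f x = g x) : l.all f = l.all g := by
  induction l with
  | nil => rfl
  | cons x t ih =>
    simp only [List.all_cons, h x (by simp), ih (fun y hy => h y (by simp [hy]))]

theorem pvMerge_eq (xs ys : List (String × Int))
    (hx : xs.Pairwise (fun a b => a.1 < b.1)) (hy : ys.Pairwise (fun a b => a.1 < b.1)) :
    pvMerge xs ys = xs.all (fun p => pvLk ys p.1 == some p.2) := by
  induction xs, ys using pvMerge.induct with
  | case1 ys => simp [pvMerge]
  | case2 p xs => simp [pvMerge, pvLk]
  | case3 k v xs k2 v2 ys hlt =>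
    rw [pvMerge]
    simp only [if_pos hlt]
    have hnone : pvLk ((k2, v2) :: ys) k = none := by
      apply pvLk_eq_none_of_forall_lt
      intro p hp
      rcases List.mem_cons.mp hp with rfl | hp'
      · exact hlt
      · exact lt_trans hlt (List.rel_of_pairwise_cons hy hp')
    simp [hnone]
  | case4 k v xs k2 v2 ys h1 h2 ih =>
    rw [pvMerge]
    simp only [if_neg h1, if_pos h2]
    rw [ih hx (List.pairwise_cons.mp hy).2]
    apply pvAll_congr
    intro p hp
    have hk2p : k2 < p.1 := by
      rcases List.mem_cons.mp hp with rfl | hp'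
      · exact h2
      · exact lt_trans h2 (List.rel_of_pairwise_cons hx hp')
    conv_rhs => rw [pvLk, if_neg (ne_of_lt hk2p)]
  | case5 k v xs k2 v2 ys h1 h2 hne =>
    have hkk : k2 = k := le_antisymm (not_lt.mp h1) (not_lt.mp h2)
    subst hkk
    rw [pvMerge]
    simp only [if_neg h1, if_pos hne]
    symm
    rw [List.all_eq_false]
    refine ⟨(k2, v), by simp, ?_⟩
    simp [pvLk, Ne.symm hne]
  | case6 k v xs k2 v2 ys h1 h2 hvv ih =>
    have hkk : k2 = k := le_antisymm (not_lt.mp h1) (not_lt.mp h2)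
    subst hkk
    have hv : v2 = v := (not_ne_iff.mp hvv).symm
    subst hv
    rw [pvMerge]
    simp only [if_neg h1, if_neg hvv]
    rw [ih (List.pairwise_cons.mp hx).2 (List.pairwise_cons.mp hy).2]
    symm
    simp only [List.all_cons]
    have hhead : pvLk ((k2, v2) :: ys) k2 = some v2 := by rw [pvLk, if_pos rfl]
    rw [hhead]
    simp only [beq_self_eq_true, Bool.true_and]
    apply pvAll_congr
    intro p hp
    have hkp : k2 < p.1 := List.rel_of_pairwise_cons hx hp
    rw [pvLk, if_neg (ne_of_lt hkp)]

-- A-side: A's set/intersection computation reduced to an 'all' over d1's keys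
theorem pvLoopA_eq_all (D1 D2 : PySem.Dict String Int) (ks : List String) :
    pvLoopA D1 D2 ks = ks.all (fun k => D1.get? k == D2.get? k) := by
  induction ks with
  | nil => rfl
  | cons k ks ih =>
    simp only [pvLoopA, List.all_cons, ih]
    by_cases h : D1.get? k = D2.get? k <;> simp [h]

theorem core_eq (D1 D2 : PySem.Dict String Int) (h1 : D1.keys.Nodup) :
    (if PySem.Set.len (PySem.Set.ofList D1.keys) ≠
        PySem.Set.len (PySem.Set.inter (PySem.Set.ofList D1.keys) (PySem.Set.ofList D2.keys)) then false
     else pvLoopA D1 D2 (PySem.Set.inter (PySem.Set.ofList D1.keys) (PySem.Set.ofList D2.keys)))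
    = D1.keys.all (fun k => D2.contains k && (D1.get? k == D2.get? k)) := by
  rw [PySem.Set.ofList_eq_self_of_nodup D1.keys h1, pvLoopA_eq_all]
  simp only [PySem.Set.inter, PySem.Set.len]
  by_cases hall : ∀ a ∈ D1.keys, (PySem.Set.ofList D2.keys).contains a = true
  · have hfil : D1.keys.filter (fun x => (PySem.Set.ofList D2.keys).contains x) = D1.keys :=
      List.filter_eq_self.mpr hall
    rw [hfil, if_neg (by simp)]
    rw [Bool.eq_iff_iff]
    simp only [List.all_eq_true, Bool.and_eq_true]
    constructor
    · intro h k hk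
      have hk2 : k ∈ D2.keys := by
        simpa [PySem.Set.contains_iff, PySem.Set.mem_ofList] using hall k hk
      exact ⟨by simp [PySem.Dict.contains_eq_decide_mem_keys, hk2], h k hk⟩
    · intro h k hk
      exact (h k hk).2
  · have hlt : (D1.keys.filter (fun x => (PySem.Set.ofList D2.keys).contains x)).length ≠ D1.keys.length := by
      intro he
      exact hall (List.length_filter_eq_length_iff.mp he)
    rw [if_pos (by exact fun he => hlt (by exact_mod_cast he.symm))]
    symm
    rw [List.all_eq_false]
    push Not at hall
    obtain ⟨a, ha, hpa⟩ := hall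
    refine ⟨a, ha, ?_⟩
    have hna : a ∉ D2.keys := by
      intro hmem
      exact hpa (by simpa [PySem.Set.contains_iff, PySem.Set.mem_ofList] using hmem)
    simp [PySem.Dict.contains_eq_decide_mem_keys, hna]

-- the keys-'all' form is the items-'all' form
theorem keysAll_eq_itemsAll (D1 D2 : PySem.Dict String Int) (h1 : D1.keys.Nodup) :
    D1.keys.all (fun k => D2.contains k && (D1.get? k == D2.get? k))
    = D1.items.all (fun p => D2.get? p.1 == some p.2) := by
  have hkeys : D1.keys = D1.items.map (·.1) := rfl
  rw [hkeys, List.all_map]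
  apply pvAll_congr
  intro p hp
  have hget : D1.get? p.1 = some p.2 := PySem.Dict.get?_of_mem_items D1 hp h1
  simp only [Function.comp, hget]
  rcases hc : D2.get? p.1 with _ | w
  · have : D2.contains p.1 = false := by rw [PySem.Dict.contains_eq_isSome_get?, hc]; rfl
    simp [this]
  · have : D2.contains p.1 = true := by rw [PySem.Dict.contains_eq_isSome_get?, hc]; rfl
    simp only [this, Bool.true_and]
    by_cases hvw : p.2 = w
    · simp [hvw]
    · have hwv : ¬ w = p.2 := fun h => hvw h.symm
      simp [hvw, hwv]

-- sorted item lists: keys strictly increasing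
theorem pvSorted_pairwise_lt (l : List (String × Int)) (h : (l.map (·.1)).Nodup) :
    (PySem.List.sorted l (fun kv => kv.1) false).Pairwise (fun a b => a.1 < b.1) := by
  have hle := PySem.List.sorted_pairwise (xs := l) (key := fun kv => kv.1)
  have hperm : (PySem.List.sorted l (fun kv => kv.1) false).Perm l := PySem.List.sorted_perm _ _ _
  have hnd : ((PySem.List.sorted l (fun kv => kv.1) false).map (·.1)).Nodup :=
    ((hperm.map (·.1)).nodup_iff).mpr h
  have hne : (PySem.List.sorted l (fun kv => kv.1) false).Pairwise (fun a b => a.1 ≠ b.1) :=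
    (List.pairwise_map).mp hnd
  exact (hle.and hne).imp (fun ⟨hle', hne'⟩ => lt_of_le_of_ne hle' hne')

-- lookup in a permutation of a dict's items agrees with the dict's lookup
theorem pvLk_perm_get? (D : PySem.Dict String Int) (ys : List (String × Int))
    (hperm : ys.Perm D.items) (hnd : D.keys.Nodup) (k : String) :
    pvLk ys k = D.get? k := by
  have hkeys : (PySem.Dict.mk ys).keys.Nodup := by
    have : (ys.map (·.1)).Perm D.keys := hperm.map (·.1)
    exact (this.nodup_iff).mpr hnd
  rw [pvLk_eq_get?]
  rcases hc : D.get? k with _ | v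
  · have hk : k ∉ D.keys := (PySem.Dict.get?_eq_none_iff_not_mem_keys D k).mp hc
    apply (PySem.Dict.get?_eq_none_iff_not_mem_keys (PySem.Dict.mk ys) k).mpr
    intro hmem
    exact hk ((hperm.map (·.1)).mem_iff.mp hmem)
  · have hmem : (k, v) ∈ D.items := PySem.Dict.mem_items_of_get?_eq_some D hc
    exact PySem.Dict.get?_of_mem_items (PySem.Dict.mk ys) (hperm.mem_iff.mpr hmem) hkeys

-- ===== VERDICT (by name: the statement is the Claim_ definition above) =====
theorem compare_dictionaries_spec : Claim_equal_compare_dictionaries := by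
  intro d1 d2 _
  unfold Spec_compare_dictionaries
  simp only [compare_dictionaries, compare_dictionaries_alt]
  set D1 := PySem.Dict.ofList d1 with hD1
  set D2 := PySem.Dict.ofList d2 with hD2
  have hnd1 : D1.keys.Nodup := PySem.Dict.nodup_keys_ofList d1
  have hnd2 : D2.keys.Nodup := PySem.Dict.nodup_keys_ofList d2
  rw [core_eq D1 D2 hnd1, keysAll_eq_itemsAll D1 D2 hnd1]
  rw [pvMerge_eq _ _ (pvSorted_pairwise_lt D1.items hnd1) (pvSorted_pairwise_lt D2.items hnd2)]
  have hall : (PySem.List.sorted D1.items (fun kv => kv.1) false).all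
      (fun p => pvLk (PySem.List.sorted D2.items (fun kv => kv.1) false) p.1 == some p.2)
      = (PySem.List.sorted D1.items (fun kv => kv.1) false).all
      (fun p => D2.get? p.1 == some p.2) := by
    apply pvAll_congr
    intro p _
    rw [pvLk_perm_get? D2 _ (PySem.List.sorted_perm _ _ _) hnd2]
  rw [hall]
  rw [Bool.eq_iff_iff]
  simp only [List.all_eq_true]
  constructor
  · intro h p hp
    exact h p ((PySem.List.sorted_perm D1.items (fun kv => kv.1) false).mem_iff.mp hp)
  · intro h p hp
    exact h p ((PySem.List.sorted_perm D1.items (fun kv => kv.1) false).mem_iff.mpr hp)
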